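-- pv_equiv track=rewrite | github.com/Duom1/checkers_python | main.py | getFrame
-- ===== SOURCE A (Python) =====
-- board = [*" b b b bb b b b  b b b b' ' ' '  ' ' ' 'a a a a  a a a aa a a a "]
--
-- def getFrame(position, board):
--     frame = []
--     for i in range(len(board)):
--         if i != position:
--             if i % 8 == 0 and i != 0: frame.append("\n")
--             frame.append(board[i])
--         else:
--             if i % 8 != 0 or i == 0: frame.append("$")
--             else: frame.append("\n$")
--     return frame
-- ===== SOURCE B (Python) =====
-- def getFrame(position, board):
--     # phase 1: mark the position (comparison, never indexing by position)
--     marked = ["$" if i == position else board[i] for i in range(len(board))]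
--     # phase 2: format into rows of 8
--     frame = []
--     for i, cell in enumerate(marked):
--         if i % 8 == 0 and i != 0:
--             frame.append("\n")
--         frame.append(cell)
--     return frame
-- ===== Notes on version B (the rewrite author's own statement) =====
-- stated objective: simpler
-- what changed: A's single loop interleaving position-marking with row formatting is split into two plain passes: first mark the position in a list comprehension, then format rows of 8 with uniform newline separators.
-- intended difference: When position is a nonzero multiple of 8 with position < len(board), A appends the single merged element '\n$' while B appends '\n' and '$' as two separate elements like at every other row boundary; the uniform two-element form is the intended one (the joined display text is identical). — e.g. on getFrame(8, ["x", "x", "x", "x", "x", "x", "x", "x", "x"]): A returns ["x", "x", "x", "x", "x", "x", "x", "x", "\n$"], B returns ["x", "x", "x", "x", "x", "x", "x", "x", "\n", "$"]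
import Mathlib
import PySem

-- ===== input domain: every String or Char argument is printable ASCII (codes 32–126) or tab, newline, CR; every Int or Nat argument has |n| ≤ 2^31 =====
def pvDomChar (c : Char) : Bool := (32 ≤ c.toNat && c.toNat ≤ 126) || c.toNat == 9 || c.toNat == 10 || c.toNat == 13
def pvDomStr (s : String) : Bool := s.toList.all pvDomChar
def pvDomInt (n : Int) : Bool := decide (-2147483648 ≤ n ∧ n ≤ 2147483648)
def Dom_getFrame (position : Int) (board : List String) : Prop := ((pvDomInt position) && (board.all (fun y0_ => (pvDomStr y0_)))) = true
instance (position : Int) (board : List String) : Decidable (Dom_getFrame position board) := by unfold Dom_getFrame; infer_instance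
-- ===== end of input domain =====

-- B splits A's single marking+formatting loop into a mark pass and a format pass (simpler);
-- intended difference: at a nonzero multiple-of-8 position A emits one merged "\n$" element, B emits "\n" and "$" separately.


-- ===== PORT A =====
def getFrame (position : Int) (board : List String) : List String :=
  (PySem.List.pyRange 0 board.length 1).foldl
    (fun frame i =>
      if i ≠ position then
        let frame := if PySem.Int.mod i 8 = 0 ∧ i ≠ 0 then frame ++ ["\n"] else frame
        frame ++ [PySem.List.pyGetD board i ""]
      else
        if PySem.Int.mod i 8 ≠ 0 ∨ i = 0 then frame ++ ["$"] else frame ++ ["\n$"])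
    []

-- ===== PORT B =====
def getFrame_alt (position : Int) (board : List String) : List String :=
  let marked := (PySem.List.pyRange 0 board.length 1).map
    (fun i => if i = position then "$" else PySem.List.pyGetD board i "")
  (PySem.List.enumerate marked 0).foldl
    (fun frame p =>
      let frame := if PySem.Int.mod p.1 8 = 0 ∧ p.1 ≠ 0 then frame ++ ["\n"] else frame
      frame ++ [p.2])
    []

-- ===== PRECONDITION & SPEC =====
-- When position is a nonzero multiple of 8 with position < len(board), A returns the merged single
-- element "\n$" there while B returns "\n" and "$" as two elements, uniform with every other row
-- boundary; B's uniform form is the intended one (the joined display text is identical).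
def D_getFrame (position : Int) (board : List String) : Prop :=
  position % 8 = 0 ∧ 0 < position ∧ position < (board.length : Int)
instance (position : Int) (board : List String) : Decidable (D_getFrame position board) := by unfold D_getFrame; infer_instance
def Spec_getFrame (position : Int) (board : List String) (out : List String) : Prop := ¬ D_getFrame position board → out = getFrame_alt position board
instance (position : Int) (board : List String) (out : List String) : Decidable (Spec_getFrame position board out) := by unfold Spec_getFrame; infer_instance
def pvDiffWitness_getFrame : Int × List String := (8, ["x", "x", "x", "x", "x", "x", "x", "x", "x"])
def pvDiffWitnessOut_getFrame : (List String) × (List String) :=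
  (["x", "x", "x", "x", "x", "x", "x", "x", "\n$"],
   ["x", "x", "x", "x", "x", "x", "x", "x", "\n", "$"])

-- ===== CLAIM (what is proved, stated in full; the proofs are below) =====
def Claim_unchanged_getFrame : Prop := ∀ (position : Int) (board : List String), Dom_getFrame position board → Spec_getFrame position board (getFrame position board)
def Claim_changed_getFrame : Prop := Dom_getFrame (pvDiffWitness_getFrame.1) (pvDiffWitness_getFrame.2) ∧ D_getFrame (pvDiffWitness_getFrame.1) (pvDiffWitness_getFrame.2) ∧ getFrame (pvDiffWitness_getFrame.1) (pvDiffWitness_getFrame.2) = pvDiffWitnessOut_getFrame.1 ∧ getFrame_alt (pvDiffWitness_getFrame.1) (pvDiffWitness_getFrame.2) = pvDiffWitnessOut_getFrame.2 ∧ pvDiffWitnessOut_getFrame.1 ≠ pvDiffWitnessOut_getFrame.2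
def Claim_exact_getFrame : Prop := ∀ (position : Int) (board : List String), Dom_getFrame position board → D_getFrame position board → getFrame position board ≠ getFrame_alt position board

-- ===== LEMMAS AND PROOFS =====

-- B's enumerate of the marked list is a map over the index range.
lemma enumerate_map_pyRange {α : Type} (f : Int → α) :
    ∀ (k : Nat) (a : Int), PySem.List.enumerate ((PySem.List.pyRange a (a + k) 1).map f) a
      = (PySem.List.pyRange a (a + k) 1).map (fun i => (i, f i)) := by
  intro k
  induction k with
  | zero => intro a; simp [PySem.List.pyRange_one_eq_nil, PySem.List.enumerate_nil]
  | succ m ih =>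
      intro a
      rw [PySem.List.pyRange_one_cons (by omega)]
      simp only [List.map_cons, PySem.List.enumerate_cons]
      have h2 : a + ((m + 1 : Nat) : Int) = (a + 1) + (m : Int) := by push_cast; ring
      rw [h2, ih (a + 1)]

-- A's loop body appends a chunk.
lemma stepA_chunk (position i : Int) (board : List String) (acc : List String) :
    (if i ≠ position then
        (if PySem.Int.mod i 8 = 0 ∧ i ≠ 0 then acc ++ ["\n"] else acc) ++ [PySem.List.pyGetD board i ""]
      else
        if PySem.Int.mod i 8 ≠ 0 ∨ i = 0 then acc ++ ["$"] else acc ++ ["\n$"])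
    = acc ++ (if i ≠ position then
        (if PySem.Int.mod i 8 = 0 ∧ i ≠ 0 then ["\n"] else []) ++ [PySem.List.pyGetD board i ""]
      else
        if PySem.Int.mod i 8 ≠ 0 ∨ i = 0 then ["$"] else ["\n$"]) := by
  split_ifs <;> simp

-- B's loop body appends a chunk.
lemma stepB_chunk (position i : Int) (board : List String) (acc : List String) :
    ((if PySem.Int.mod i 8 = 0 ∧ i ≠ 0 then acc ++ ["\n"] else acc)
        ++ [if i = position then "$" else PySem.List.pyGetD board i ""])
    = acc ++ ((if PySem.Int.mod i 8 = 0 ∧ i ≠ 0 then ["\n"] else [])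
        ++ [if i = position then "$" else PySem.List.pyGetD board i ""]) := by
  split_ifs <;> simp

-- length of a chunk-appending fold
lemma len_foldl_append {α : Type} (g : α → List String) :
    ∀ (l : List α) (init : List String),
      (l.foldl (fun acc i => acc ++ g i) init).length
        = init.length + (l.map (fun i => (g i).length)).sum := by
  intro l
  induction l with
  | nil => intro init; simp
  | cons x xs ih =>
      intro init
      rw [List.foldl_cons, ih, List.map_cons, List.sum_cons]
      simp [List.length_append]
      omega

def chunkA (position : Int) (board : List String) (i : Int) : List String :=
  if i ≠ position then
    (if PySem.Int.mod i 8 = 0 ∧ i ≠ 0 then ["\n"] else []) ++ [PySem.List.pyGetD board i ""]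
  else
    if PySem.Int.mod i 8 ≠ 0 ∨ i = 0 then ["$"] else ["\n$"]

def chunkB (position : Int) (board : List String) (i : Int) : List String :=
  (if PySem.Int.mod i 8 = 0 ∧ i ≠ 0 then ["\n"] else [])
    ++ [if i = position then "$" else PySem.List.pyGetD board i ""]

lemma getFrame_eq_chunks (position : Int) (board : List String) :
    getFrame position board
      = (PySem.List.pyRange 0 board.length 1).foldl
          (fun acc i => acc ++ chunkA position board i) [] := by
  unfold getFrame
  apply PySem.List.foldl_congr_mem
  intro acc i _
  simpa [chunkA] using stepA_chunk position i board acc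

lemma getFrame_alt_eq_chunks (position : Int) (board : List String) :
    getFrame_alt position board
      = (PySem.List.pyRange 0 board.length 1).foldl
          (fun acc i => acc ++ chunkB position board i) [] := by
  simp only [getFrame_alt]
  have he := enumerate_map_pyRange
    (fun i => if i = position then "$" else PySem.List.pyGetD board i "") board.length 0
  simp only [zero_add] at he
  rw [he, List.foldl_map]
  apply PySem.List.foldl_congr_mem
  intro acc i _
  simpa [chunkB] using stepB_chunk position i board acc

lemma chunk_eq_of_notD (position : Int) (board : List String)
    (hD : ¬ D_getFrame position board) (i : Int)
    (hmem : i ∈ PySem.List.pyRange 0 board.length 1) :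
    chunkA position board i = chunkB position board i := by
  rw [PySem.List.mem_pyRange_one] at hmem
  by_cases hip : i = position
  · subst hip
    have hb : ¬ (PySem.Int.mod i 8 = 0 ∧ i ≠ 0) := by
      intro ⟨h1, h2⟩
      rw [PySem.Int.mod_eq_emod_of_pos (by omega)] at h1
      exact hD ⟨h1, by omega, hmem.2⟩
    have hc : PySem.Int.mod i 8 ≠ 0 ∨ i = 0 := by tauto
    simp only [chunkA, chunkB]
    rw [if_neg (by simp), if_pos hc, if_neg hb]
    simp
  · simp [chunkA, chunkB, hip]

lemma chunk_len_eq_of_ne (position : Int) (board : List String) (i : Int) (hip : i ≠ position) :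
    (chunkA position board i).length = (chunkB position board i).length := by
  simp only [chunkA, chunkB, if_pos hip]
  split_ifs <;> simp

-- ===== VERDICT (by name: the statement is the Claim_ definition above) =====
theorem getFrame_spec : Claim_unchanged_getFrame := by
  intro position board _ hD
  rw [getFrame_eq_chunks, getFrame_alt_eq_chunks]
  apply PySem.List.foldl_congr_mem
  intro acc i h
  rw [chunk_eq_of_notD position board hD i h]

theorem getFrame_changed : Claim_changed_getFrame := by unfold Claim_changed_getFrame; decide

theorem getFrame_tight : Claim_exact_getFrame := by
  intro position board _ hD h
  obtain ⟨h8, hpos, hlen⟩ := hD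
  have hlens := congrArg List.length h
  rw [getFrame_eq_chunks, getFrame_alt_eq_chunks,
      len_foldl_append (chunkA position board), len_foldl_append (chunkB position board)] at hlens
  rw [PySem.List.pyRange_one_append 0 position (board.length : Int) (by omega) (by omega),
      PySem.List.pyRange_one_append position (position + 1) (board.length : Int) (by omega) (by omega),
      PySem.List.pyRange_one_singleton] at hlens
  have hm : PySem.Int.mod position 8 = 0 := by
    rw [PySem.Int.mod_eq_emod_of_pos (by omega)]; exact h8
  have hb : ¬ (PySem.Int.mod position 8 ≠ 0 ∨ position = 0) := by
    push Not; exact ⟨hm, by omega⟩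
  have hAp : (chunkA position board position).length = 1 := by
    simp only [chunkA]
    rw [if_neg (by simp), if_neg hb]
    simp
  have hBp : (chunkB position board position).length = 2 := by
    simp only [chunkB]
    rw [if_pos ⟨hm, by omega⟩]
    simp
  have hL : ((PySem.List.pyRange 0 position 1).map
      (fun i => (chunkA position board i).length)).sum
      = ((PySem.List.pyRange 0 position 1).map
      (fun i => (chunkB position board i).length)).sum := by
    congr 1
    apply List.map_congr_left
    intro i hi
    rw [PySem.List.mem_pyRange_one] at hi
    exact chunk_len_eq_of_ne position board i (by omega)
  have hR : ((PySem.List.pyRange (position + 1) (board.length : Int) 1).map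
      (fun i => (chunkA position board i).length)).sum
      = ((PySem.List.pyRange (position + 1) (board.length : Int) 1).map
      (fun i => (chunkB position board i).length)).sum := by
    congr 1
    apply List.map_congr_left
    intro i hi
    rw [PySem.List.mem_pyRange_one] at hi
    exact chunk_len_eq_of_ne position board i (by omega)
  simp only [List.map_append, List.sum_append, List.map_cons, List.map_nil, List.sum_cons,
    List.sum_nil, hAp, hBp] at hlens
  omega
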